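-- pv_equiv track=rewrite | github.com/yburanova/adventofcode | 2024/day16.py | evaluate_path
-- ===== SOURCE A (Python) =====
-- def evaluate_path(path):
--     direction_map = {
--         'r': {'next': (0, 1),
--               'turns': {'d': (1, 0),
--                         'u': (-1, 0)}},
--         'l': {'next': (0, -1),
--               'turns': {'d': (1, 0),
--                         'u': (-1, 0)}},
--         'u': {'next': (-1, 0),
--               'turns': {'r': (0, 1),
--                         'l': (0, -1)}},
--         'd': {'next': (1, 0),
--               'turns': {'r': (0, 1),
--                         'l': (0, -1)}}
--     }
--
--     score = 0
--     last = path[0]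
--     current_direction = 'r'
--     for step in path:
--         if step == path[0]:
--             continue
--
--         dx, dy = step[0] - last[0], step[1] - last[1]
--
--         # Check if moving in the current direction
--         expected_dx, expected_dy = direction_map[current_direction]['next']
--         if (dx, dy) == (expected_dx, expected_dy):
--             score += 1
--         else:
--             # Check if it's a valid turn
--             for new_direction, (turn_dx, turn_dy) in direction_map[current_direction]['turns'].items():
--                 if (dx, dy) == (turn_dx, turn_dy):
--                     current_direction = new_direction
--                     score += 1001
--                     break
--
--         # Update the last position
--         last = step
--
--     return score
-- ===== SOURCE B (Python) =====
-- def evaluate_path(path):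
--     start = path[0]
--     pts = [start] + [p for p in path if p != start]
--     delta_dir = {(0, 1): 'r', (0, -1): 'l', (-1, 0): 'u', (1, 0): 'd'}
--     axis = {'r': 0, 'l': 0, 'u': 1, 'd': 1}
--     # stage 1: the sequence of unit-step headings along the cleaned path
--     dirs = []
--     for a, b in zip(pts, pts[1:]):
--         d = delta_dir.get((b[0] - a[0], b[1] - a[1]))
--         if d is not None:
--             dirs.append(d)
--     # stage 2: split that sequence into maximal runs of constant axis
--     runs = []
--     while dirs:
--         head = dirs[0]
--         i = 1
--         while i < len(dirs) and axis[dirs[i]] == axis[head]: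
--             i += 1
--         runs.append(dirs[:i])
--         dirs = dirs[i:]
--     # stage 3: score the runs statelessly. The first run continues the implicit
--     # initial 'r' heading if horizontal (each 'r' in it scores 1); every other run
--     # opens with a 1001-point turn onto its first heading, then 1 per matching step.
--     if runs and axis[runs[0][0]] == 0:
--         score, rest = runs[0].count('r'), runs[1:]
--     else:
--         score, rest = 0, runs
--     for run in rest:
--         score += 1000 + run.count(run[0])
--     return score
-- ===== Notes on version B (the rewrite author's own statement) =====
-- stated objective: alternative
-- what changed: Replaces A's stateful single-pass direction simulation (mutable current_direction with a nested turn-table scan) by three stateless stages: extract the heading sequence from consecutive cleaned points, split it into maximal runs of constant axis, then score each run by counting occurrences of its opening heading (1001 for the turn opening a run, 1 per matching step).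
-- outside the precondition, e.g. on evaluate_path([]): A raises IndexError, B raises IndexError
import Mathlib
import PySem

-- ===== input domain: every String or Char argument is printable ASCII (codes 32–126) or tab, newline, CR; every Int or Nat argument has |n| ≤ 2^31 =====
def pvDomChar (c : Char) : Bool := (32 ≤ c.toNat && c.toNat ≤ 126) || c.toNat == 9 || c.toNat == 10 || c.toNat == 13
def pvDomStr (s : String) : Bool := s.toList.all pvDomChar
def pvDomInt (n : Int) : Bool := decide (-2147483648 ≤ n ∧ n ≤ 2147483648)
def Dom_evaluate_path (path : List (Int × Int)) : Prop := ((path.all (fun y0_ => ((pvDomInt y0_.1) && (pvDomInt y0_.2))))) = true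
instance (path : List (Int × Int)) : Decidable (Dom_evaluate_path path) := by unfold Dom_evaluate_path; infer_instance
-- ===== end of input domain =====

-- B replaces A's stateful direction-simulation loop by three stateless stages
-- (heading extraction, grouping into maximal constant-axis runs, per-run counting);
-- objective: alternative algorithm of the same cost.

-- ===== PORT A =====
-- direction_map[...]['next']
def dmNext (d : String) : Int × Int :=
  if d = "r" then (0, 1)
  else if d = "l" then (0, -1)
  else if d = "u" then (-1, 0)
  else (1, 0)

-- direction_map[...]['turns'].items()
def dmTurns (d : String) : List (String × (Int × Int)) :=
  if d = "r" ∨ d = "l" then [("d", (1, 0)), ("u", (-1, 0))]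
  else [("r", (0, 1)), ("l", (0, -1))]

-- the inner `for new_direction, (turn_dx, turn_dy) in ...: if ...: ...; break` loop
def turnLoop (turns : List (String × (Int × Int))) (dxy : Int × Int)
    (cur : String) (score : Int) : String × Int :=
  match turns with
  | [] => (cur, score)
  | (nd, t) :: rest =>
    if dxy = t then (nd, score + 1001) else turnLoop rest dxy cur score

-- the main `for step in path` loop
def aLoop (first : Int × Int) (steps : List (Int × Int))
    (last : Int × Int) (cur : String) (score : Int) : Int :=
  match steps with
  | [] => score
  | step :: rest =>
    if step = first then aLoop first rest last cur score
    else
      let dxy : Int × Int := (step.1 - last.1, step.2 - last.2)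
      if dxy = dmNext cur then aLoop first rest step cur (score + 1)
      else
        let p := turnLoop (dmTurns cur) dxy cur score
        aLoop first rest step p.1 p.2

def evaluate_path (path : List (Int × Int)) : Int :=
  match path with
  | [] => 0   -- unreachable under Pre_ (Python raises IndexError on path[0])
  | p0 :: _ => aLoop p0 path p0 "r" 0

-- ===== PORT B =====
-- delta_dir.get(...)
def deltaDir (d : Int × Int) : Option String :=
  if d = ((0 : Int), (1 : Int)) then some "r"
  else if d = ((0 : Int), (-1 : Int)) then some "l"
  else if d = ((-1 : Int), (0 : Int)) then some "u"
  else if d = ((1 : Int), (0 : Int)) then some "d"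
  else none

-- axis[...]
def axisOf (d : String) : Int := if d = "r" ∨ d = "l" then 0 else 1

-- stage 1: the `for a, b in zip(pts, pts[1:]): ... dirs.append(d)` loop
def extractDirs (pairs : List ((Int × Int) × (Int × Int))) : List String :=
  pairs.filterMap (fun p => deltaDir (p.2.1 - p.1.1, p.2.2 - p.1.2))

-- stage 2: the `while dirs: ... runs.append(dirs[:i]); dirs = dirs[i:]` loop
-- (dirs[1:i] is the maximal prefix of dirs[1:] on the axis of dirs[0])
def runsByAxis (dirs : List String) : List (List String) :=
  match dirs with
  | [] => []
  | d :: rest =>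
    (d :: rest.takeWhile (fun x => axisOf x == axisOf d)) ::
      runsByAxis (rest.dropWhile (fun x => axisOf x == axisOf d))
termination_by dirs.length
decreasing_by
  simp only [List.length_cons]
  exact Nat.lt_succ_of_le (List.length_dropWhile_le _ _)

-- stage 3: the `for run in rest: score += 1000 + run.count(run[0])` loop
-- (run[0] ported as headD "?": every run produced by stage 2 is nonempty)
def restSum (rs : List (List String)) (score : Int) : Int :=
  rs.foldl (fun s run => s + 1000 + (run.count (run.headD "?") : Int)) score

def evaluate_path_alt (path : List (Int × Int)) : Int :=
  match path with
  | [] => 0   -- unreachable under Pre_ (Python raises IndexError on path[0])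
  | p0 :: _ =>
    let pts := p0 :: path.filter (fun p => p ≠ p0)
    let runs := runsByAxis (extractDirs (pts.zip pts.tail))
    match runs with
    | [] => restSum [] 0
    | r :: rs =>
      if axisOf (r.headD "?") = 0 then restSum rs ((r.count "r" : Int))
      else restSum (r :: rs) 0

-- ===== PRECONDITION & SPEC =====
-- Pre_ excludes only the empty list, on which the Python A (and B) raise IndexError at path[0].
def Pre_evaluate_path (path : List (Int × Int)) : Prop := path ≠ []
instance (path : List (Int × Int)) : Decidable (Pre_evaluate_path path) := by
  unfold Pre_evaluate_path; infer_instance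

def pvWitness_evaluate_path : (List (Int × Int)) := [(0, 0), (0, 1), (1, 1)]

def Spec_evaluate_path (path : List (Int × Int)) (out : Int) : Prop := out = evaluate_path_alt path
instance (path : List (Int × Int)) (out : Int) : Decidable (Spec_evaluate_path path out) := by
  unfold Spec_evaluate_path; infer_instance

-- ===== CLAIM (what is proved, stated in full; the proofs are below) =====
def Claim_equal_evaluate_path : Prop := ∀ (path : List (Int × Int)), Dom_evaluate_path path → Pre_evaluate_path path → Spec_evaluate_path path (evaluate_path path)

-- ===== LEMMAS AND PROOFS =====

def ValidDir (c : String) : Prop := c = "r" ∨ c = "l" ∨ c = "u" ∨ c = "d"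

-- one-step state transition of A's loop body (non-skipped step)
def stepA (cur : String) (dxy : Int × Int) (score : Int) : String × Int :=
  if dxy = dmNext cur then (cur, score + 1) else turnLoop (dmTurns cur) dxy cur score

-- one-step transition at the heading level (what A does to (cur, score) per heading)
def stepD (cur : String) (d : String) (score : Int) : String × Int :=
  if d = cur then (cur, score + 1)
  else if axisOf d ≠ axisOf cur then (d, score + 1001)
  else (cur, score)

-- pair-level intermediate loop: A's per-step action expressed on consecutive pairs
def pairLoop (pairs : List ((Int × Int) × (Int × Int))) (cur : String) (score : Int) : Int :=
  match pairs with
  | [] => score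
  | (a, b) :: rest =>
    match deltaDir (b.1 - a.1, b.2 - a.2) with
    | some d =>
      let p := stepD cur d score
      pairLoop rest p.1 p.2
    | none => pairLoop rest cur score

-- heading-level loop
def procDirs (dirs : List String) (cur : String) (score : Int) : Int :=
  match dirs with
  | [] => score
  | d :: rest =>
    let p := stepD cur d score
    procDirs rest p.1 p.2

-- B's score of a run list, given the incoming heading
def bScoreAux (cur : String) (runs : List (List String)) : Int :=
  match runs with
  | [] => 0
  | r :: rs =>
    if axisOf (r.headD "?") = axisOf cur then (r.count cur : Int) + restSum rs 0
    else restSum (r :: rs) 0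

lemma step_eq (cur : String) (h : ValidDir cur) (dxy : Int × Int) (score : Int) :
    stepA cur dxy score =
      (match deltaDir dxy with
       | some d => stepD cur d score
       | none => (cur, score)) := by
  rcases h with h | h | h | h <;> subst h <;>
    by_cases h1 : dxy = ((0 : Int), (1 : Int)) <;>
    by_cases h2 : dxy = ((0 : Int), (-1 : Int)) <;>
    by_cases h3 : dxy = ((-1 : Int), (0 : Int)) <;>
    by_cases h4 : dxy = ((1 : Int), (0 : Int)) <;>
    simp_all [stepA, stepD, dmNext, dmTurns, turnLoop, deltaDir, axisOf]

lemma stepA_valid (cur : String) (h : ValidDir cur) (dxy : Int × Int) (score : Int) :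
    ValidDir (stepA cur dxy score).1 := by
  rcases h with h | h | h | h <;> subst h <;>
    by_cases h3 : dxy = ((-1 : Int), (0 : Int)) <;>
    by_cases h4 : dxy = ((1 : Int), (0 : Int)) <;>
    by_cases h1 : dxy = ((0 : Int), (1 : Int)) <;>
    by_cases h2 : dxy = ((0 : Int), (-1 : Int)) <;>
    simp_all [stepA, ValidDir, dmNext, dmTurns, turnLoop]

lemma aLoop_cons_ne (first step last : Int × Int) (rest : List (Int × Int))
    (cur : String) (score : Int) (h : step ≠ first) :
    aLoop first (step :: rest) last cur score =
      aLoop first rest step (stepA cur (step.1 - last.1, step.2 - last.2) score).1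
        (stepA cur (step.1 - last.1, step.2 - last.2) score).2 := by
  conv_lhs => rw [aLoop]
  rw [if_neg h]
  unfold stepA
  split <;> simp_all

lemma pairLoop_cons (a b : Int × Int) (rest : List ((Int × Int) × (Int × Int)))
    (cur : String) (score : Int) :
    pairLoop ((a, b) :: rest) cur score =
      (match deltaDir (b.1 - a.1, b.2 - a.2) with
       | some d => pairLoop rest (stepD cur d score).1 (stepD cur d score).2
       | none => pairLoop rest cur score) := by
  simp only [pairLoop]

-- A's loop over the raw path equals the pair-level loop over the cleaned points
lemma main_eq (steps : List (Int × Int)) (first last : Int × Int)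
    (cur : String) (score : Int) (h : ValidDir cur) :
    aLoop first steps last cur score =
      pairLoop ((last :: steps.filter (fun p => p ≠ first)).zip
              (steps.filter (fun p => p ≠ first))) cur score := by
  induction steps generalizing last cur score with
  | nil => simp [aLoop, pairLoop]
  | cons step rest ih =>
    by_cases hs : step = first
    · simp only [aLoop, List.filter_cons, hs]
      simpa using ih last cur score h
    · have hf : (step :: rest).filter (fun p => p ≠ first)
          = step :: rest.filter (fun p => p ≠ first) := by
        simp [hs]
      rw [hf, List.zip_cons_cons, pairLoop_cons,
        aLoop_cons_ne _ _ _ _ _ _ hs, step_eq cur h]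
      have hv := stepA_valid cur h (step.1 - last.1, step.2 - last.2) score
      rw [step_eq cur h] at hv
      rcases hd : deltaDir (step.1 - last.1, step.2 - last.2) with _ | d <;>
        rw [hd] at hv <;> dsimp only at hv ⊢ <;> exact ih step _ _ hv

-- the pair-level loop equals the heading-level loop on the extracted headings
lemma pairLoop_eq_proc (pairs : List ((Int × Int) × (Int × Int)))
    (cur : String) (score : Int) :
    pairLoop pairs cur score = procDirs (extractDirs pairs) cur score := by
  induction pairs generalizing cur score with
  | nil => simp [pairLoop, extractDirs, procDirs]
  | cons p rest ih =>
    obtain ⟨a, b⟩ := p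
    simp only [pairLoop, extractDirs, List.filterMap_cons]
    rcases hd : deltaDir (b.1 - a.1, b.2 - a.2) with _ | d
    · exact ih cur score
    · simp only [procDirs]
      exact ih _ _

-- a whole run on the current axis: +1 per element equal to cur, cur unchanged
lemma proc_run (run : List String) (rest : List String) (cur : String) (score : Int)
    (h : ∀ d ∈ run, axisOf d = axisOf cur) :
    procDirs (run ++ rest) cur score = procDirs rest cur (score + (run.count cur : Int)) := by
  induction run generalizing score with
  | nil => simp
  | cons d t ih =>
    have hd := h d (by simp)
    have ht : ∀ x ∈ t, axisOf x = axisOf cur := fun x hx => h x (by simp [hx])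
    by_cases hc : d = cur
    · subst hc
      rw [List.cons_append, procDirs, show stepD d d score = (d, score + 1) by simp [stepD]]
      rw [ih _ ht]
      congr 1
      rw [List.count_cons_self]
      push_cast; ring
    · rw [List.cons_append, procDirs, show stepD cur d score = (cur, score) by simp [stepD, hc, hd]]
      rw [ih _ ht]
      congr 1
      have : (d == cur) = false := by simp [hc]
      simp [List.count_cons, this]

lemma dropWhile_head_false {p : String → Bool} {l : List String} {x : String}
    {xs : List String} (h : l.dropWhile p = x :: xs) : p x = false := by
  induction l with
  | nil => simp [List.dropWhile] at h
  | cons a t ih =>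
    rw [List.dropWhile_cons] at h
    by_cases hp : p a = true
    · rw [if_pos hp] at h; exact ih h
    · rw [if_neg hp] at h
      cases h; simpa using hp

lemma restSum_shift (rs : List (List String)) (a : Int) :
    restSum rs a = a + restSum rs 0 := by
  induction rs generalizing a with
  | nil => simp [restSum]
  | cons r t ih =>
    simp only [restSum, List.foldl_cons] at *
    rw [ih, ih (0 + 1000 + _)]
    ring

-- a run list whose first run opens off the current axis scores as restSum
lemma bScoreAux_off_axis (cur : String) (o : List String)
    (h : ∀ x xs, o = x :: xs → axisOf x ≠ axisOf cur) :
    bScoreAux cur (runsByAxis o) = restSum (runsByAxis o) 0 := by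
  cases o with
  | nil => simp [runsByAxis, bScoreAux, restSum]
  | cons x xs =>
    rw [runsByAxis]
    simp only [bScoreAux, List.headD_cons]
    rw [if_neg (h x xs rfl)]

-- main lemma: the heading-level simulation equals B's stateless run scoring
lemma bScoreAux_cons (cur d : String) (t : List String) (rs : List (List String)) :
    bScoreAux cur ((d :: t) :: rs) =
      if axisOf d = axisOf cur then ((d :: t).count cur : Int) + restSum rs 0
      else restSum ((d :: t) :: rs) 0 := by
  simp [bScoreAux]

lemma proc_runs : ∀ n (dirs : List String), dirs.length ≤ n → ∀ (cur : String) (score : Int),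
    procDirs dirs cur score = score + bScoreAux cur (runsByAxis dirs) := by
  intro n
  induction n with
  | zero =>
    intro dirs h cur score
    cases dirs with
    | nil => simp [procDirs, runsByAxis, bScoreAux]
    | cons a b => simp at h
  | succ n ih =>
    intro dirs hlen cur score
    cases dirs with
    | nil => simp [procDirs, runsByAxis, bScoreAux]
    | cons d rest =>
      have hsplit : rest = rest.takeWhile (fun x => axisOf x == axisOf d)
          ++ rest.dropWhile (fun x => axisOf x == axisOf d) :=
        (List.takeWhile_append_dropWhile).symm
      set t := rest.takeWhile (fun x => axisOf x == axisOf d) with ht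
      set o := rest.dropWhile (fun x => axisOf x == axisOf d) with ho
      have hruns : runsByAxis (d :: rest) = (d :: t) :: runsByAxis o := by
        rw [runsByAxis]
      have hto : ∀ x ∈ t, axisOf x = axisOf d := by
        intro x hx
        have := List.mem_takeWhile_imp hx
        simpa using this
      have holen : o.length ≤ n := by
        have h1 : o.length ≤ rest.length := List.length_dropWhile_le _ _
        have h2 : rest.length + 1 ≤ n + 1 := by simpa using hlen
        omega
      have hohead : ∀ x xs, o = x :: xs → axisOf x ≠ axisOf d := by
        intro x xs hx
        have := dropWhile_head_false (ho ▸ hx)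
        simpa using this
      by_cases hA : axisOf d = axisOf cur
      · -- same axis: the whole first run extends cur's run
        have hall : ∀ x ∈ d :: t, axisOf x = axisOf cur := by
          intro x hx
          rcases List.mem_cons.mp hx with h | h
          · subst h; exact hA
          · rw [hto x h]; exact hA
        have hstart : procDirs (d :: rest) cur score
            = procDirs ((d :: t) ++ o) cur score := by
          rw [List.cons_append, ← hsplit]
        have hoff : bScoreAux cur (runsByAxis o) = restSum (runsByAxis o) 0 :=
          bScoreAux_off_axis cur o
            (fun x xs hx hc => hohead x xs hx (hc.trans hA.symm))
        rw [hstart, proc_run _ _ _ _ hall, ih o holen cur _, hoff,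
          hruns, bScoreAux_cons, if_pos hA]
        ring
      · -- different axis: the first run opens with a 1001-point turn onto d
        have hdc : d ≠ cur := fun hc => hA (by rw [hc])
        have hstart : procDirs (d :: rest) cur score
            = procDirs (t ++ o) d (score + 1001) := by
          rw [procDirs, show stepD cur d score = (d, score + 1001) by
            simp [stepD, hdc, hA], ← hsplit]
        have hoff : bScoreAux d (runsByAxis o) = restSum (runsByAxis o) 0 :=
          bScoreAux_off_axis d o hohead
        rw [hstart, proc_run _ _ _ _ hto, ih o holen d _, hoff,
          hruns, bScoreAux_cons, if_neg hA]
        simp only [restSum, List.foldl_cons, List.headD_cons]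
        have hshift := restSum_shift (runsByAxis o) (0 + 1000 + ((d :: t).count d : Int))
        simp only [restSum] at hshift
        rw [hshift]
        have hcnt : ((d :: t).count d : Int) = 1 + (t.count d : Int) := by
          rw [List.count_cons_self]; push_cast; ring
        rw [hcnt]; ring

-- B's final run-scoring expression equals bScoreAux "r"
lemma alt_score_eq (runs : List (List String)) :
    (match runs with
     | [] => restSum [] 0
     | r :: rs =>
       if axisOf (r.headD "?") = 0 then restSum rs ((r.count "r" : Int))
       else restSum (r :: rs) 0) = bScoreAux "r" runs := by
  cases runs with
  | nil => simp [bScoreAux, restSum]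
  | cons r rs =>
    have hr : axisOf "r" = 0 := by simp [axisOf]
    simp only [bScoreAux, hr]
    by_cases h : axisOf (r.headD "?") = 0
    · rw [if_pos h, if_pos h, restSum_shift]
    · rw [if_neg h, if_neg h]

-- ===== VERDICT (by name: the statement is the Claim_ definition above) =====
theorem evaluate_path_spec : Claim_equal_evaluate_path := by
  intro path _ hpre
  unfold Spec_evaluate_path
  match path with
  | [] => exact absurd rfl hpre
  | p0 :: rest =>
    show aLoop p0 (p0 :: rest) p0 "r" 0 = _
    simp only [evaluate_path_alt, List.tail_cons]
    rw [main_eq (p0 :: rest) p0 p0 "r" 0 (Or.inl rfl), pairLoop_eq_proc,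
      proc_runs (extractDirs _).length _ le_rfl, alt_score_eq]
    ring
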